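-- pv_equiv track=rewrite | github.com/onixuniverse/university_tasks | 3.55.py | find_sum_of_abs
-- ===== SOURCE A (Python) =====
-- def find_sum_of_abs(arr: list):
--     negative_number_index = -1
--
--     for i in arr:
--         if i < 0:
--             negative_number_index = arr.index(i)
--             break
--
--     sum_of_abs = sum([abs(arr[i]) for i in range(negative_number_index + 1, len(arr))]) \
--         if negative_number_index != -1 else 0
--
--     return sum_of_abs
-- ===== SOURCE B (Python) =====
-- def find_sum_of_abs(arr: list):
--     started = False
--     total = 0
--     for x in arr:
--         if not started and x < 0:
--             started = True
--         elif started: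
--             total += abs(x)
--     return total
-- ===== Notes on version B (the rewrite author's own statement) =====
-- stated objective: simpler
-- what changed: Replaces A's two-phase scheme (scan for a negative, re-find its index with arr.index, then sum a range-indexed comprehension) with a single streaming pass using a started flag and a running accumulator.
import Mathlib
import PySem

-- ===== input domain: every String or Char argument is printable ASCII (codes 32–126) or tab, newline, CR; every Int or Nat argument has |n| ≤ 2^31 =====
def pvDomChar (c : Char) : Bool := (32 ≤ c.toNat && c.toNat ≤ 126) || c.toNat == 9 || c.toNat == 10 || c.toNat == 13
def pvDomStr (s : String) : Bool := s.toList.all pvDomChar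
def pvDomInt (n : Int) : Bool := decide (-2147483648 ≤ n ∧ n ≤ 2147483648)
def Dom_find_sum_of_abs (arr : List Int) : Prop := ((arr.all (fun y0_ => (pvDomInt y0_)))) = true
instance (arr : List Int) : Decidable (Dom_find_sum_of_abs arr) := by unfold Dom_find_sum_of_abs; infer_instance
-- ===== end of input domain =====

-- B replaces A's find-negative-then-index-then-range-sum scheme with one streaming pass
-- (flag + accumulator); return values proved equal on all inputs.

-- ===== PORT A =====
-- the 'for i in arr: if i < 0: … = arr.index(i); break' loop; 'orig' is arr (for arr.index)
def pvAFind (orig : List Int) : List Int → Int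
  | [] => -1
  | i :: rest =>
    if i < 0 then
      -- arr.index(i); i ∈ arr here, so index? never returns none (no ValueError)
      match PySem.List.index? orig i with
      | some n => (n : Int)
      | none => -1
    else pvAFind orig rest

def find_sum_of_abs (arr : List Int) : Int :=
  let negative_number_index : Int := pvAFind arr arr
  if negative_number_index ≠ -1 then
    ((PySem.List.pyRange (negative_number_index + 1) (arr.length : Int) 1).map
      (fun i => |PySem.List.pyGetD arr i 0|)).sum
  else 0

-- ===== PORT B =====
-- the single pass with 'started' flag and running 'total'
def pvBGo : List Int → Bool → Int → Int
  | [], _, total => total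
  | x :: xs, started, total =>
    if !started && x < 0 then pvBGo xs true total
    else if started then pvBGo xs started (total + |x|)
    else pvBGo xs started total

def find_sum_of_abs_alt (arr : List Int) : Int := pvBGo arr false 0

-- ===== PRECONDITION & SPEC =====
def Spec_find_sum_of_abs (arr : List Int) (out : Int) : Prop := out = find_sum_of_abs_alt arr
instance (arr : List Int) (out : Int) : Decidable (Spec_find_sum_of_abs arr out) := by unfold Spec_find_sum_of_abs; infer_instance

-- ===== CLAIM (what is proved, stated in full; the proofs are below) =====
def Claim_equal_find_sum_of_abs : Prop := ∀ (arr : List Int), Dom_find_sum_of_abs arr → Spec_find_sum_of_abs arr (find_sum_of_abs arr)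

-- ===== LEMMAS AND PROOFS =====

-- once started, B sums the absolute values of the rest
theorem pvBGo_started (xs : List Int) : ∀ (total : Int),
    pvBGo xs true total = total + (xs.map (fun x => |x|)).sum := by
  induction xs with
  | nil => intro total; simp [pvBGo]
  | cons x xs ih => intro total; simp [pvBGo, ih]; ring

-- A's range-indexed comprehension sum is the sum of |·| over the tail
theorem pvSumRange (xs : List Int) (a : Int) (ha : 0 ≤ a) :
    ((PySem.List.pyRange a (xs.length : Int) 1).map (fun i => |PySem.List.pyGetD xs i 0|)).sum
      = ((xs.drop a.toNat).map (fun x => |x|)).sum := by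
  have h : (fun i => |PySem.List.pyGetD xs i 0|)
      = (fun x => |x|) ∘ (fun i => PySem.List.pyGetD xs i 0) := rfl
  rw [h, ← List.map_map, PySem.List.map_pyGetD_pyRange' xs 0 ha]

-- a nonnegative prefix is skipped by A's scan
theorem pvAFind_prefix (orig : List Int) (pre : List Int) :
    ∀ (suf : List Int), (∀ x ∈ pre, 0 ≤ x) →
    pvAFind orig (pre ++ suf) = pvAFind orig suf := by
  induction pre with
  | nil => intro suf _; rfl
  | cons y ys ih =>
    intro suf h
    have hy : ¬ y < 0 := by have := h y (by simp); omega
    simp only [List.cons_append, pvAFind, hy, if_false]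
    exact ih suf (fun x hx => h x (by simp [hx]))

-- main invariant: with all of 'pre' nonnegative, A on pre ++ suf equals B's scan of suf
theorem pvMain (suf : List Int) : ∀ (pre : List Int), (∀ x ∈ pre, 0 ≤ x) →
    find_sum_of_abs (pre ++ suf) = pvBGo suf false 0 := by
  induction suf with
  | nil =>
    intro pre hpre
    have hfind : pvAFind (pre ++ []) (pre ++ []) = -1 := by
      rw [pvAFind_prefix _ pre [] hpre]; rfl
    simp only [find_sum_of_abs, hfind, ne_eq, not_true_eq_false, if_false, pvBGo]
  | cons x rest ih =>
    intro pre hpre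
    by_cases hx : x < 0
    · -- A: index? finds x at position pre.length; B: switch on, sum abs of rest
      have hxpre : x ∉ pre := by
        intro hmem; exact absurd (hpre x hmem) (by omega)
      have hidx : PySem.List.index? (pre ++ x :: rest) x = some pre.length := by
        rw [PySem.List.index?_eq_some_iff]
        exact ⟨pre, rest, rfl, rfl, hxpre⟩
      have hfind : pvAFind (pre ++ x :: rest) (pre ++ x :: rest) = (pre.length : Int) := by
        rw [pvAFind_prefix _ pre _ hpre]
        simp only [pvAFind, if_pos hx, hidx]
      have hne : (pre.length : Int) ≠ -1 := by omega
      have hdrop : (pre ++ x :: rest).drop ((pre.length : Int) + 1).toNat = rest := by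
        have hcat : pre ++ x :: rest = (pre ++ [x]) ++ rest := by simp
        rw [hcat]
        have hl : ((pre.length : Int) + 1).toNat = (pre ++ [x]).length := by
          simp
        rw [hl, List.drop_left]
      rw [show find_sum_of_abs (pre ++ x :: rest)
            = ((PySem.List.pyRange ((pre.length : Int) + 1) (((pre ++ x :: rest).length : Nat) : Int) 1).map
                (fun i => |PySem.List.pyGetD (pre ++ x :: rest) i 0|)).sum by
            simp only [find_sum_of_abs, hfind, hne, ne_eq, not_false_eq_true, if_true]]
      rw [pvSumRange _ _ (by omega), hdrop]
      simp [pvBGo, hx, pvBGo_started]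
    · -- A: keep scanning past x; B: stay off
      have hcat : pre ++ x :: rest = (pre ++ [x]) ++ rest := by simp
      have hpre' : ∀ y ∈ pre ++ [x], 0 ≤ y := by
        intro y hy
        rcases List.mem_append.mp hy with h | h
        · exact hpre y h
        · simp at h; omega
      rw [hcat, ih (pre ++ [x]) hpre']
      simp [pvBGo, hx]

-- ===== VERDICT (by name: the statement is the Claim_ definition above) =====
theorem find_sum_of_abs_spec : Claim_equal_find_sum_of_abs := by
  intro arr _
  unfold Spec_find_sum_of_abs find_sum_of_abs_alt
  have := pvMain arr [] (by simp)
  simpa using this
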